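-- pv_equiv track=rewrite | github.com/Kaloqn250/text_processing_exercise | letters_change_numbers.py | second_letters_solving
-- ===== SOURCE A (Python) =====
-- def second_letters_solving(letter, numbers):
--     letter_position = 0
--     result = 0
--
--     if letter.isupper():
--         for letter_as_int in range(65, 91):
--             letter_position += 1
--             if letter_as_int == ord(letter):
--                 break
--         result = numbers - letter_position
--
--     elif letter.islower():
--         for letter_as_int in range(97, 123):
--             letter_position += 1
--             if letter_as_int == ord(letter):
--                 break
--         result = numbers + letter_position
--     return result
-- ===== SOURCE B (Python) =====
-- def second_letters_solving(letter, numbers):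
--     if letter.isupper():
--         return numbers - (ord(letter) - 64)
--     if letter.islower():
--         return numbers + (ord(letter) - 96)
--     return 0
-- ===== Notes on version B (the rewrite author's own statement) =====
-- stated objective: simpler
-- what changed: Replaces the linear scans over range(65,91)/range(97,123) that count up to the letter's alphabet position with the closed-form position ord(letter)-64 / ord(letter)-96.
import Mathlib
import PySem

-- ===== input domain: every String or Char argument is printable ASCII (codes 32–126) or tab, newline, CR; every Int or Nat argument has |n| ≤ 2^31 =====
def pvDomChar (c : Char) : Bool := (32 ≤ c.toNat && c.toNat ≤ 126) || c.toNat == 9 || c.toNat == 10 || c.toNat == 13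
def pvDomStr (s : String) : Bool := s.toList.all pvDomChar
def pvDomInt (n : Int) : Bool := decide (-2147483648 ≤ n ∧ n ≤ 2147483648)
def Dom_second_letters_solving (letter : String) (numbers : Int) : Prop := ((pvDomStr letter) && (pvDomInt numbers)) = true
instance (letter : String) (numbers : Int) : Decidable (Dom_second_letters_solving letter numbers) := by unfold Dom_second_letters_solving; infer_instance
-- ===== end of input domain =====

set_option maxRecDepth 4000


-- B replaces A's counting scans over range(65,91)/range(97,123) with the closed-form
-- position ord(letter)-64 / ord(letter)-96 (objective: simpler).

-- shared helpers (exact on the ASCII domain):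
-- Python str.isupper(): some cased character and no lowercase cased one; on ASCII the
-- cased characters are exactly the letters. Hand-ported (PySem has only Char versions).
def pyStrIsupper (s : String) : Bool :=
  s.toList.any PySem.Chars.isalpha &&
    s.toList.all (fun c => !PySem.Chars.isalpha c || PySem.Chars.isupper c)

def pyStrIslower (s : String) : Bool :=
  s.toList.any PySem.Chars.isalpha &&
    s.toList.all (fun c => !PySem.Chars.isalpha c || PySem.Chars.islower c)

-- ord(letter): defined for a one-character string; Python raises TypeError otherwise,
-- which Pre_ excludes (the 0 below is never reached inside Pre_).
def pyOrd (s : String) : Int :=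
  match s.toList with
  | [c] => (c.toNat : Int)
  | _ => 0

-- ===== PORT A =====
-- A's scanning loop: walk the code range, incrementing letter_position, break on match.
def pvScanA (target : Int) (codes : List Int) (letter_position : Int) : Int :=
  match codes with
  | [] => letter_position
  | c :: rest =>
    let letter_position := letter_position + 1
    if c == target then letter_position else pvScanA target rest letter_position

def second_letters_solving (letter : String) (numbers : Int) : Int :=
  if pyStrIsupper letter then
    numbers - pvScanA (pyOrd letter) (PySem.List.pyRange 65 91 1) 0
  else if pyStrIslower letter then
    numbers + pvScanA (pyOrd letter) (PySem.List.pyRange 97 123 1) 0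
  else 0

-- ===== PORT B =====
def second_letters_solving_alt (letter : String) (numbers : Int) : Int :=
  if pyStrIsupper letter then
    numbers - (pyOrd letter - 64)
  else if pyStrIslower letter then
    numbers + (pyOrd letter - 96)
  else 0

-- ===== PRECONDITION & SPEC =====
-- Pre_ excludes exactly the inputs where A raises TypeError: a string of length ≠ 1
-- that is isupper() or islower() (ord(letter) then raises). B raises there too.
def Pre_second_letters_solving (letter : String) (numbers : Int) : Prop :=
  (pyStrIsupper letter = true ∨ pyStrIslower letter = true) → letter.length = 1
instance (letter : String) (numbers : Int) : Decidable (Pre_second_letters_solving letter numbers) := by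
  unfold Pre_second_letters_solving; infer_instance

def pvWitness_second_letters_solving : String × Int := ("C", 10)

def Spec_second_letters_solving (letter : String) (numbers : Int) (out : Int) : Prop := out = second_letters_solving_alt letter numbers
instance (letter : String) (numbers : Int) (out : Int) : Decidable (Spec_second_letters_solving letter numbers out) := by unfold Spec_second_letters_solving; infer_instance

-- ===== CLAIM (what is proved, stated in full; the proofs are below) =====
def Claim_equal_second_letters_solving : Prop := ∀ (letter : String) (numbers : Int), Dom_second_letters_solving letter numbers → Pre_second_letters_solving letter numbers → Spec_second_letters_solving letter numbers (second_letters_solving letter numbers)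

-- ===== LEMMAS AND PROOFS =====

-- A's scan over a consecutive code range containing the target counts up to its offset.
lemma pvScanA_range (n : Nat) : ∀ (lo t pos : Int), lo ≤ t → t < lo + n →
    pvScanA t (PySem.List.pyRange lo (lo + n) 1) pos = pos + (t - lo + 1) := by
  induction n with
  | zero => intro lo t pos h1 h2; push_cast at h2; omega
  | succ m ih =>
    intro lo t pos h1 h2
    rw [PySem.List.pyRange_one_cons (by push_cast; omega)]
    simp only [pvScanA]
    by_cases h : lo = t
    · simp [h]
    · have hne : (lo == t) = false := by simp [h]
      simp only [hne, Bool.false_eq_true, if_false]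
      have e : lo + (m.succ : Int) = (lo + 1) + m := by push_cast; ring
      rw [e, ih (lo+1) t (pos+1) (by omega) (by push_cast at h2 ⊢; omega)]
      ring

lemma pvScanA_upper (t : Int) (h1 : 65 ≤ t) (h2 : t ≤ 90) :
    pvScanA t (PySem.List.pyRange 65 91 1) 0 = t - 64 := by
  have := pvScanA_range 26 65 t 0 h1 (by push_cast; omega)
  norm_num at this
  omega

lemma pvScanA_lower (t : Int) (h1 : 97 ≤ t) (h2 : t ≤ 122) :
    pvScanA t (PySem.List.pyRange 97 123 1) 0 = t - 96 := by
  have := pvScanA_range 26 97 t 0 h1 (by push_cast; omega)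
  norm_num at this
  omega

-- a one-character isupper()/islower() string has code 65..90 resp. 97..122
lemma pyOrd_upper_range (s : String) (c : Char) (hl : s.toList = [c])
    (h : pyStrIsupper s = true) : 65 ≤ (c.toNat : Int) ∧ (c.toNat : Int) ≤ 90 := by
  unfold pyStrIsupper at h
  rw [hl] at h
  simp only [List.any_cons, List.any_nil, List.all_cons, List.all_nil, Bool.or_false,
    Bool.and_true, Bool.and_eq_true] at h
  obtain ⟨ha, hb⟩ := h
  have hup : PySem.Chars.isupper c = true := by simpa [ha] using hb
  unfold PySem.Chars.isupper at hup
  simp only [Bool.and_eq_true, decide_eq_true_eq] at hup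
  obtain ⟨h1, h2⟩ := hup
  rw [Char.le_def, UInt32.le_iff_toNat_le] at h1 h2
  have e1 : ('A').val.toNat = 65 := rfl
  have e2 : ('Z').val.toNat = 90 := rfl
  have e3 : c.toNat = c.val.toNat := rfl
  omega

lemma pyOrd_lower_range (s : String) (c : Char) (hl : s.toList = [c])
    (h : pyStrIslower s = true) : 97 ≤ (c.toNat : Int) ∧ (c.toNat : Int) ≤ 122 := by
  unfold pyStrIslower at h
  rw [hl] at h
  simp only [List.any_cons, List.any_nil, List.all_cons, List.all_nil, Bool.or_false,
    Bool.and_true, Bool.and_eq_true] at h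
  obtain ⟨ha, hb⟩ := h
  have hlo : PySem.Chars.islower c = true := by simpa [ha] using hb
  unfold PySem.Chars.islower at hlo
  simp only [Bool.and_eq_true, decide_eq_true_eq] at hlo
  obtain ⟨h1, h2⟩ := hlo
  rw [Char.le_def, UInt32.le_iff_toNat_le] at h1 h2
  have e1 : ('a').val.toNat = 97 := rfl
  have e2 : ('z').val.toNat = 122 := rfl
  have e3 : c.toNat = c.val.toNat := rfl
  omega

lemma singleton_toList (s : String) (hlen : s.length = 1) : ∃ c, s.toList = [c] := by
  have h' : s.toList.length = 1 := by
    rw [String.length_toList]; exact hlen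
  exact List.length_eq_one_iff.mp h'

-- ===== VERDICT (by name: the statement is the Claim_ definition above) =====
theorem second_letters_solving_spec : Claim_equal_second_letters_solving := by
  intro letter numbers _ hpre
  unfold Spec_second_letters_solving second_letters_solving second_letters_solving_alt
  by_cases hu : pyStrIsupper letter = true
  · obtain ⟨c, h⟩ := singleton_toList letter (hpre (Or.inl hu))
    have hord : pyOrd letter = (c.toNat : Int) := by simp [pyOrd, h]
    obtain ⟨h1, h2⟩ := pyOrd_upper_range letter c h hu
    simp only [hu, if_true, hord]
    rw [pvScanA_upper _ h1 h2]
  · by_cases hl : pyStrIslower letter = true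
    · obtain ⟨c, h⟩ := singleton_toList letter (hpre (Or.inr hl))
      have hord : pyOrd letter = (c.toNat : Int) := by simp [pyOrd, h]
      obtain ⟨h1, h2⟩ := pyOrd_lower_range letter c h hl
      simp only [hu, hl, if_true, Bool.false_eq_true, if_false, hord]
      rw [pvScanA_lower _ h1 h2]
    · simp [hu, hl]
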